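-- pv_equiv track=rewrite | github.com/RighteousW/sign_avatar | src/audio2gloss/word_mapping.py | _map_to_valid_gloss
-- ===== SOURCE A (Python) =====
-- from typing import Optional
--
-- def _map_to_valid_gloss(word: str, word_to_gloss_map, valid_glosses) -> Optional[str]:
--     """Map a word to a valid gloss, or return None if no mapping exists"""
--     word_lower = word.lower()
--
--     # Check direct mapping
--     if word_lower in word_to_gloss_map:
--         return word_to_gloss_map[word_lower]
--
--     # Check if word.upper() is already a valid gloss
--     word_upper = word.upper()
--     if word_upper in valid_glosses:
--         return word_upper
--
--     # Try removing common suffixes and check again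
--     suffixes = ["s", "ed", "ing", "er", "est", "ly"]
--     for suffix in suffixes:
--         if word_lower.endswith(suffix):
--             stem = word_lower[: -len(suffix)]
--             if stem in word_to_gloss_map:
--                 return word_to_gloss_map[stem]
--             if stem.upper() in valid_glosses:
--                 return stem.upper()
--
--     return None
-- ===== SOURCE B (Python) =====
-- from typing import Optional
--
--
-- def _map_to_valid_gloss(word: str, word_to_gloss_map, valid_glosses) -> Optional[str]:
--     """Map a word to a valid gloss, or return None if no mapping exists."""
--     # Merge the two lookup sources into ONE resolution dict, built once:
--     # explicit mappings win; a valid gloss G is reachable from the lowercase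
--     # key G.lower() whenever upper-casing that key gives back G.
--     resolve = dict(word_to_gloss_map)
--     for gloss in valid_glosses:
--         key = gloss.lower()
--         if key.upper() == gloss and key not in resolve:
--             resolve[key] = gloss
--     # One loop over suffixes; "" stands for the unstripped word itself.
--     word_lower = word.lower()
--     for suffix in ("", "s", "ed", "ing", "er", "est", "ly"):
--         if word_lower.endswith(suffix):
--             result = resolve.get(word_lower[: len(word_lower) - len(suffix)])
--             if result is not None:
--                 return result
--     return None
-- ===== Notes on version B (the rewrite author's own statement) =====
-- stated objective: alternative
-- what changed: B builds a single merged resolution dict once (explicit mappings plus each valid gloss keyed by its lowercase form when upper-casing that key restores the gloss), then resolves the word and every suffix stem with one lookup each, instead of A's interleaved dict-check-then-gloss-membership at three separate sites.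
import Mathlib
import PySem

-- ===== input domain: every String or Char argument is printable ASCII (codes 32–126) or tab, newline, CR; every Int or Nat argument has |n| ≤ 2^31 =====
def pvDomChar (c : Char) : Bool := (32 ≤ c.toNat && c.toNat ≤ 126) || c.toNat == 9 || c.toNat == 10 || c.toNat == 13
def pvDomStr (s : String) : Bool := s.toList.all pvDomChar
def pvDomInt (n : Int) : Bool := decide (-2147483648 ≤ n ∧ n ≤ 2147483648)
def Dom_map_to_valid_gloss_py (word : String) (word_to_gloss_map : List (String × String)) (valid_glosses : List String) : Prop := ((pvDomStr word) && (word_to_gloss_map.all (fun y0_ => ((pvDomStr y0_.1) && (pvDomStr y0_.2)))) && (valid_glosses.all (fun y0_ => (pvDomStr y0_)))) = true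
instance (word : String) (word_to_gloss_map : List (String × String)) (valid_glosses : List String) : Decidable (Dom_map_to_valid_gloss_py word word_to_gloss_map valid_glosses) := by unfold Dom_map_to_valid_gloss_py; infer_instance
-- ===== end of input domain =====

-- B merges the gloss set and the mapping into one resolution dict built once, then resolves candidates with a single lookup each (alternative decomposition; trades a one-time pass over the gloss set).


-- ===== PORT A =====
-- A's suffix loop: for each suffix, if word_lower ends with it, check the stem in the map and as a gloss.
def pySuffixLoop (wl : String) (word_to_gloss_map : List (String × String)) (valid_glosses : List String) : List String → Option String
  | [] => none
  | suffix :: rest =>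
      if PySem.Str.endswith wl suffix then
        let stem := PySem.Str.slice wl none (some (-(PySem.Str.len suffix)))
        match (PySem.Dict.mk word_to_gloss_map).get? stem with
        | some v => some v
        | none =>
            if valid_glosses.contains (PySem.Str.upper stem) then some (PySem.Str.upper stem)
            else pySuffixLoop wl word_to_gloss_map valid_glosses rest
      else pySuffixLoop wl word_to_gloss_map valid_glosses rest

def map_to_valid_gloss_py (word : String) (word_to_gloss_map : List (String × String)) (valid_glosses : List String) : Option String :=
  let word_lower := PySem.Str.lower word
  match (PySem.Dict.mk word_to_gloss_map).get? word_lower with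
  | some v => some v
  | none =>
      let word_upper := PySem.Str.upper word
      if valid_glosses.contains word_upper then some word_upper
      else pySuffixLoop word_lower word_to_gloss_map valid_glosses ["s", "ed", "ing", "er", "est", "ly"]

-- ===== PORT B =====
-- body of B's resolve-building loop: add gloss under key gloss.lower() if key.upper() == gloss and key absent
def altStep (d : PySem.Dict String String) (gloss : String) : PySem.Dict String String :=
  let key := PySem.Str.lower gloss
  if PySem.Str.upper key == gloss && !(d.contains key) then d.insert key gloss else d

-- resolve = dict(word_to_gloss_map), then the loop over valid_glosses (a set: the dict is only looked up afterwards, so its iteration order cannot affect the result)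
def altResolve (word_to_gloss_map : List (String × String)) (valid_glosses : List String) : PySem.Dict String String :=
  valid_glosses.foldl altStep (PySem.Dict.mk word_to_gloss_map)

-- B's suffix loop: one lookup per candidate stem ("" = the unstripped word)
def altLoop (resolve : PySem.Dict String String) (wl : String) : List String → Option String
  | [] => none
  | suffix :: rest =>
      if PySem.Str.endswith wl suffix then
        match resolve.get? (PySem.Str.slice wl none (some (PySem.Str.len wl - PySem.Str.len suffix))) with
        | some v => some v
        | none => altLoop resolve wl rest
      else altLoop resolve wl rest

def map_to_valid_gloss_py_alt (word : String) (word_to_gloss_map : List (String × String)) (valid_glosses : List String) : Option String :=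
  let resolve := altResolve word_to_gloss_map valid_glosses
  altLoop resolve (PySem.Str.lower word) ["", "s", "ed", "ing", "er", "est", "ly"]

-- ===== PRECONDITION & SPEC =====
def Spec_map_to_valid_gloss_py (word : String) (word_to_gloss_map : List (String × String)) (valid_glosses : List String) (out : Option String) : Prop := out = map_to_valid_gloss_py_alt word word_to_gloss_map valid_glosses
instance (word : String) (word_to_gloss_map : List (String × String)) (valid_glosses : List String) (out : Option String) : Decidable (Spec_map_to_valid_gloss_py word word_to_gloss_map valid_glosses out) := by unfold Spec_map_to_valid_gloss_py; infer_instance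

-- ===== CLAIM (what is proved, stated in full; the proofs are below) =====
def Claim_equal_map_to_valid_gloss_py : Prop := ∀ (word : String) (word_to_gloss_map : List (String × String)) (valid_glosses : List String), Dom_map_to_valid_gloss_py word word_to_gloss_map valid_glosses → Spec_map_to_valid_gloss_py word word_to_gloss_map valid_glosses (map_to_valid_gloss_py word word_to_gloss_map valid_glosses)

-- ===== LEMMAS AND PROOFS =====

-- character-level case facts (PySem's ASCII case model)
theorem upperChar_lowerChar (c : Char) : PySem.Chars.upperChar (PySem.Chars.lowerChar c) = PySem.Chars.upperChar c := by
  have hA : ('A' ≤ c) ↔ 65 ≤ c.toNat := by rw [Char.le_def, UInt32.le_iff_toNat_le]; rfl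
  have hZ : (c ≤ 'Z') ↔ c.toNat ≤ 90 := by rw [Char.le_def, UInt32.le_iff_toNat_le]; rfl
  have ha : ('a' ≤ c) ↔ 97 ≤ c.toNat := by rw [Char.le_def, UInt32.le_iff_toNat_le]; rfl
  by_cases h : PySem.Chars.isupper c = true
  · have hb : 65 ≤ c.toNat ∧ c.toNat ≤ 90 := by
      have := h; unfold PySem.Chars.isupper at this
      simp only [Bool.and_eq_true, decide_eq_true_eq] at this
      exact ⟨hA.mp this.1, hZ.mp this.2⟩
    have hval : (c.toNat + 32).isValidChar := by unfold Nat.isValidChar; left; omega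
    have htn : (Char.ofNat (c.toNat + 32)).toNat = c.toNat + 32 := by
      rw [Char.toNat_ofNat, if_pos hval]
    set d := Char.ofNat (c.toNat + 32) with hd
    have ha' : ('a' ≤ d) ↔ 97 ≤ d.toNat := by rw [Char.le_def, UInt32.le_iff_toNat_le]; rfl
    have hz' : (d ≤ 'z') ↔ d.toNat ≤ 122 := by rw [Char.le_def, UInt32.le_iff_toNat_le]; rfl
    have hlow : PySem.Chars.islower d = true := by
      unfold PySem.Chars.islower
      simp only [Bool.and_eq_true, decide_eq_true_eq]
      exact ⟨ha'.mpr (by omega), hz'.mpr (by omega)⟩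
    have hnl : PySem.Chars.islower c = false := by
      unfold PySem.Chars.islower
      simp only [Bool.and_eq_false_iff, decide_eq_false_iff_not]
      left; intro hc; have := ha.mp hc; omega
    unfold PySem.Chars.lowerChar PySem.Chars.upperChar
    rw [if_pos h, ← hd, if_pos hlow, hnl]
    simp only [Bool.false_eq_true, if_false, htn, Nat.add_sub_cancel, Char.ofNat_toNat]
  · unfold PySem.Chars.lowerChar
    rw [if_neg h]

theorem lowerChar_idem (c : Char) : PySem.Chars.lowerChar (PySem.Chars.lowerChar c) = PySem.Chars.lowerChar c := by
  have hA : ('A' ≤ c) ↔ 65 ≤ c.toNat := by rw [Char.le_def, UInt32.le_iff_toNat_le]; rfl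
  have hZ : (c ≤ 'Z') ↔ c.toNat ≤ 90 := by rw [Char.le_def, UInt32.le_iff_toNat_le]; rfl
  by_cases h : PySem.Chars.isupper c = true
  · have hb : 65 ≤ c.toNat ∧ c.toNat ≤ 90 := by
      have := h; unfold PySem.Chars.isupper at this
      simp only [Bool.and_eq_true, decide_eq_true_eq] at this
      exact ⟨hA.mp this.1, hZ.mp this.2⟩
    have hval : (c.toNat + 32).isValidChar := by unfold Nat.isValidChar; left; omega
    have htn : (Char.ofNat (c.toNat + 32)).toNat = c.toNat + 32 := by
      rw [Char.toNat_ofNat, if_pos hval]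
    set d := Char.ofNat (c.toNat + 32) with hd
    have hA' : ('A' ≤ d) ↔ 65 ≤ d.toNat := by rw [Char.le_def, UInt32.le_iff_toNat_le]; rfl
    have hZ' : (d ≤ 'Z') ↔ d.toNat ≤ 90 := by rw [Char.le_def, UInt32.le_iff_toNat_le]; rfl
    have hnu : PySem.Chars.isupper d = false := by
      unfold PySem.Chars.isupper
      simp only [Bool.and_eq_false_iff, decide_eq_false_iff_not]
      right; intro hc; have := hZ'.mp hc; omega
    have hlc : PySem.Chars.lowerChar c = d := by
      unfold PySem.Chars.lowerChar; rw [if_pos h]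
    rw [hlc]
    unfold PySem.Chars.lowerChar
    rw [hnu]
    simp
  · have hlc : PySem.Chars.lowerChar c = c := by
      unfold PySem.Chars.lowerChar; rw [if_neg h]
    rw [hlc, hlc]

theorem lowerChar_upperChar_of_fix (c : Char) (h : PySem.Chars.lowerChar c = c) :
    PySem.Chars.lowerChar (PySem.Chars.upperChar c) = c := by
  have ha : ('a' ≤ c) ↔ 97 ≤ c.toNat := by rw [Char.le_def, UInt32.le_iff_toNat_le]; rfl
  have hz : (c ≤ 'z') ↔ c.toNat ≤ 122 := by rw [Char.le_def, UInt32.le_iff_toNat_le]; rfl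
  by_cases hl : PySem.Chars.islower c = true
  · have hb : 97 ≤ c.toNat ∧ c.toNat ≤ 122 := by
      have := hl; unfold PySem.Chars.islower at this
      simp only [Bool.and_eq_true, decide_eq_true_eq] at this
      exact ⟨ha.mp this.1, hz.mp this.2⟩
    have hval : (c.toNat - 32).isValidChar := by unfold Nat.isValidChar; left; omega
    have htn : (Char.ofNat (c.toNat - 32)).toNat = c.toNat - 32 := by
      rw [Char.toNat_ofNat, if_pos hval]
    unfold PySem.Chars.upperChar
    rw [if_pos hl]
    set d := Char.ofNat (c.toNat - 32) with hd
    have hA' : ('A' ≤ d) ↔ 65 ≤ d.toNat := by rw [Char.le_def, UInt32.le_iff_toNat_le]; rfl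
    have hZ' : (d ≤ 'Z') ↔ d.toNat ≤ 90 := by rw [Char.le_def, UInt32.le_iff_toNat_le]; rfl
    have hu : PySem.Chars.isupper d = true := by
      unfold PySem.Chars.isupper
      simp only [Bool.and_eq_true, decide_eq_true_eq]
      exact ⟨hA'.mpr (by omega), hZ'.mpr (by omega)⟩
    unfold PySem.Chars.lowerChar
    rw [if_pos hu, hd, htn]
    have : c.toNat - 32 + 32 = c.toNat := by omega
    rw [this, Char.ofNat_toNat]
  · unfold PySem.Chars.upperChar
    rw [if_neg hl]
    exact h

-- upper-casing after lower-casing is upper-casing (per character, hence per string)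
theorem upper_lower (s : String) : PySem.Str.upper (PySem.Str.lower s) = PySem.Str.upper s := by
  unfold PySem.Str.upper
  rw [PySem.Str.toList_lower]
  unfold PySem.Chars.upper PySem.Chars.lower
  rw [List.map_map]
  congr 1
  exact List.map_congr_left (fun c _ => upperChar_lowerChar c)

-- LFix s: every character of s is fixed by lower-casing (true of any lower() image and its slices)
def LFix (s : String) : Prop := ∀ x ∈ s.toList, PySem.Chars.lowerChar x = x

theorem lfix_lower (s : String) : LFix (PySem.Str.lower s) := by
  intro x hx
  rw [PySem.Str.toList_lower] at hx
  unfold PySem.Chars.lower at hx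
  obtain ⟨y, _, rfl⟩ := List.mem_map.mp hx
  exact lowerChar_idem y

theorem lfix_slice (s : String) (a b : Option Int) (h : LFix s) : LFix (PySem.Str.slice s a b) := by
  intro x hx
  apply h
  rw [PySem.Str.toList_slice, PySem.Chars.slice_eq_listSlice] at hx
  unfold PySem.List.slice at hx
  exact List.mem_of_mem_drop (List.mem_of_mem_take hx)

theorem lower_upper_chars (l : List Char) (h : ∀ x ∈ l, PySem.Chars.lowerChar x = x) :
    l.map (fun x => PySem.Chars.lowerChar (PySem.Chars.upperChar x)) = l := by
  induction l with
  | nil => rfl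
  | cons a t ih =>
      rw [List.map_cons, lowerChar_upperChar_of_fix a (h a (by simp)),
          ih (fun x hx => h x (by simp [hx]))]

theorem lower_upper_of_lfix (s : String) (h : LFix s) : PySem.Str.lower (PySem.Str.upper s) = s := by
  rw [← String.toList_inj, PySem.Str.toList_lower, PySem.Str.toList_upper]
  unfold PySem.Chars.lower PySem.Chars.upper
  rw [List.map_map]
  exact lower_upper_chars s.toList h

-- slice with negative stop -k (0 < k ≤ len) equals slice to len - k
theorem slice_neg_eq (s : String) (k : Nat) (hk : 0 < k) (h : k ≤ s.toList.length) :
    PySem.Str.slice s none (some (-(k : Int))) = PySem.Str.slice s none (some ((s.toList.length : Int) - k)) := by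
  rw [← String.toList_inj, PySem.Str.toList_slice, PySem.Str.toList_slice,
      PySem.Chars.slice_eq_listSlice, PySem.Chars.slice_eq_listSlice]
  simp only [PySem.List.slice, PySem.List.clampIdx]
  have e0 : (-(k : Int) < 0) := by omega
  have e1 : ¬((s.toList.length : Int) + -(k : Int) < 0) := by omega
  have e2 : ¬((s.toList.length : Int) - k < 0) := by omega
  rw [if_pos e0, if_neg e1, if_neg e2]
  congr 2
  omega

-- slicing to the full length is the identity
theorem slice_full (s : String) : PySem.Str.slice s none (some ((s.toList.length : Int))) = s := by
  rw [← String.toList_inj, PySem.Str.toList_slice, PySem.Chars.slice_eq_listSlice]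
  simp only [PySem.List.slice, PySem.List.clampIdx]
  have e2 : ¬((s.toList.length : Int) < 0) := by omega
  rw [if_neg e2]
  simp

-- altStep with its let zeta-reduced
theorem altStep_eq (d : PySem.Dict String String) (gl : String) :
    altStep d gl = if (PySem.Str.upper (PySem.Str.lower gl) == gl && !(d.contains (PySem.Str.lower gl))) = true
      then d.insert (PySem.Str.lower gl) gl else d := rfl

-- what the resolve dict answers at a lower-fixed key: the map's value first, else the matching gloss
theorem resolve_get (g : List String) (d : PySem.Dict String String) (c : String) (hc : LFix c) :
    (g.foldl altStep d).get? c =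
      match d.get? c with
      | some v => some v
      | none => if g.contains (PySem.Str.upper c) then some (PySem.Str.upper c) else none := by
  induction g generalizing d with
  | nil => cases hdc : d.get? c <;> simp [hdc]
  | cons gl gs ih =>
      rw [List.foldl_cons, ih (altStep d gl)]
      by_cases hg : gl = PySem.Str.upper c
      · subst hg
        cases hdc : d.get? c with
        | some v =>
            have hcon : d.contains c = true := by
              rw [PySem.Dict.contains_eq_isSome_get?, hdc]; rfl
            have hstep : altStep d (PySem.Str.upper c) = d := by
              rw [altStep_eq, lower_upper_of_lfix c hc, hcon]
              simp
            rw [hstep, hdc]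
        | none =>
            have hcon : d.contains c = false := by
              rw [PySem.Dict.contains_eq_isSome_get?, hdc]; rfl
            have hstep : altStep d (PySem.Str.upper c) = d.insert c (PySem.Str.upper c) := by
              rw [altStep_eq, lower_upper_of_lfix c hc, hcon]
              simp
            rw [hstep, PySem.Dict.get?_insert_self]
            simp
      · have hget : (altStep d gl).get? c = d.get? c := by
          rw [altStep_eq]
          by_cases hcond : (PySem.Str.upper (PySem.Str.lower gl) == gl && !(d.contains (PySem.Str.lower gl))) = true
          · rw [if_pos hcond]
            have hne : c ≠ PySem.Str.lower gl := by
              intro hce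
              apply hg
              have heq : PySem.Str.upper (PySem.Str.lower gl) = gl := by
                simpa using ((Bool.and_eq_true _ _).mp hcond).1
              rw [← heq, ← hce]
            exact PySem.Dict.get?_insert_of_ne d _ hne
          · rw [if_neg hcond]
        rw [hget]
        cases hdc : d.get? c with
        | some v => rfl
        | none =>
            have hb : (PySem.Str.upper c == gl) = false := by
              simp only [beq_eq_false_iff_ne, ne_eq]
              exact fun h => hg h.symm
            have : (gl :: gs).contains (PySem.Str.upper c) = gs.contains (PySem.Str.upper c) := by
              simp only [List.contains_cons, hb, Bool.false_or]
            rw [this]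

-- endswith implies the suffix is no longer than the string
theorem endswith_len_le (s p : String) (h : PySem.Str.endswith s p = true) :
    p.toList.length ≤ s.toList.length := by
  rw [PySem.Str.endswith_eq] at h
  exact (PySem.Chars.endswith_iff _ _ |>.mp h).length_le

-- A's suffix loop equals B's loop over the same (nonempty) suffixes
theorem loop_eq (wl : String) (m : List (String × String)) (g : List String) (hwl : LFix wl)
    (sufs : List String) (hs : ∀ p ∈ sufs, p.toList ≠ []) :
    pySuffixLoop wl m g sufs = altLoop (altResolve m g) wl sufs := by
  induction sufs with
  | nil => rfl
  | cons p rest ih =>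
      have ih' := ih (fun q hq => hs q (by simp [hq]))
      by_cases he : PySem.Str.endswith wl p = true
      · have hk : 0 < p.toList.length := by
          cases hp : p.toList with
          | nil => exact absurd hp (hs p (by simp))
          | cons a t => simp
        have hle := endswith_len_le wl p he
        have hstem : PySem.Str.slice wl none (some (-(PySem.Str.len p))) =
            PySem.Str.slice wl none (some (PySem.Str.len wl - PySem.Str.len p)) := by
          unfold PySem.Str.len
          exact slice_neg_eq wl p.toList.length hk hle
        set stem := PySem.Str.slice wl none (some (PySem.Str.len wl - PySem.Str.len p)) with hst
        have hstemfix : LFix stem := lfix_slice wl _ _ hwl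
        simp only [pySuffixLoop, altLoop, he, if_pos, hstem]
        rw [altResolve, resolve_get g _ stem hstemfix]
        cases hmk : (PySem.Dict.mk m).get? stem with
        | some v => rfl
        | none =>
            by_cases hcg : PySem.Str.upper stem ∈ g
            · simp [hcg]
            · have hcf : g.contains (PySem.Str.upper stem) = false := by
                simp [List.contains_eq_mem, hcg]
              simp only [hcf, Bool.false_eq_true, if_false, ih']
              rfl
      · simp only [pySuffixLoop, altLoop, he, Bool.false_eq_true, if_false]
        exact ih'

-- ===== VERDICT (by name: the statement is the Claim_ definition above) =====
theorem map_to_valid_gloss_py_spec : Claim_equal_map_to_valid_gloss_py := by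
  intro word m g _
  unfold Spec_map_to_valid_gloss_py map_to_valid_gloss_py map_to_valid_gloss_py_alt
  set wl := PySem.Str.lower word with hwl
  have hfix : LFix wl := lfix_lower word
  have hend : PySem.Str.endswith wl "" = true := by
    rw [PySem.Str.endswith_eq]
    rw [PySem.Chars.endswith_iff]
    simp
  have hlen0 : PySem.Str.len ("" : String) = 0 := by rfl
  have hfull : PySem.Str.slice wl none (some (PySem.Str.len wl - PySem.Str.len ("" : String))) = wl := by
    rw [hlen0, sub_zero]
    unfold PySem.Str.len
    exact slice_full wl
  simp only [altLoop, hend, if_pos, hfull]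
  rw [altResolve, resolve_get g _ wl hfix]
  cases hmk : (PySem.Dict.mk m).get? wl with
  | some v => rfl
  | none =>
      have hupper : PySem.Str.upper wl = PySem.Str.upper word := upper_lower word
      rw [hupper]
      by_cases hcg : PySem.Str.upper word ∈ g
      · simp [hcg]
      · simp only [List.contains_eq_mem, hcg, decide_false, Bool.false_eq_true, if_false]
        rw [loop_eq wl m g hfix _ (by intro p hp; fin_cases hp <;> simp)]
        rfl
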